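-- pv_equiv track=rewrite | github.com/NicolaiSoeborg/ctf-writeups | 2021/Union CTF 2021/epitaph/solve.py | VM_P
-- ===== SOURCE A (Python) =====
-- def VM_P(param1: list):
--     """ PKCS#5 padding """
--     _loc2_ = param1.copy()
--     i = 1
--     while (len(param1) + i) % 8 != 0:
--         i += 1
--
--     j = 0
--     while j < i:
--         _loc2_.append(i)
--         j += 1
--
--     return _loc2_
-- ===== SOURCE B (Python) =====
-- def VM_P(param1: list):
--     """ PKCS#5 padding: closed-form pad length instead of two while-loops """
--     pad = 8 - len(param1) % 8
--     return param1 + [pad] * pad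
-- ===== Notes on version B (the rewrite author's own statement) =====
-- stated objective: simpler
-- what changed: Replaces the search loop for the pad length and the append loop with a closed-form pad = 8 - len % 8 and a single list-multiplication concatenation.
import Mathlib
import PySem

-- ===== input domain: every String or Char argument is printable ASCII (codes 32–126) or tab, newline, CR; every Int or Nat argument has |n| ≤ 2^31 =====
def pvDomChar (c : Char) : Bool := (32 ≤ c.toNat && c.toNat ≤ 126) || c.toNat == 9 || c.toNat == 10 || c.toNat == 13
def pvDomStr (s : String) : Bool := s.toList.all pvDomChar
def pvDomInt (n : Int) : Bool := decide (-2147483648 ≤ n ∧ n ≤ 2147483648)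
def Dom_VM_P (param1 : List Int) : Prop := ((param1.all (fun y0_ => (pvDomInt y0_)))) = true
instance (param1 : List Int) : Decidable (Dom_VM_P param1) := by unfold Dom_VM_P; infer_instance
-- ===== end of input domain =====

-- B replaces A's two while-loops (a search for the pad length and an append loop)
-- with a closed-form pad = 8 - len % 8 and one replicate-concatenation; simpler, same cost.


-- ===== PORT A =====
-- first while loop: while (len(param1) + i) % 8 != 0: i += 1
-- (structural fuel only makes the loop total; 8 steps always suffice since len ≥ 0)
def VM_P_loop1 : Nat → Int → Int → Int
  | 0, _, i => i
  | fuel + 1, n, i => if PySem.Int.mod (n + i) 8 ≠ 0 then VM_P_loop1 fuel n (i + 1) else i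

-- second while loop: while j < i: _loc2_.append(i); j += 1 (fuel = remaining iterations)
def VM_P_loop2 : Nat → List Int → Int → Int → List Int
  | 0, acc, _, _ => acc
  | fuel + 1, acc, j, i => if j < i then VM_P_loop2 fuel (acc ++ [i]) (j + 1) i else acc

def VM_P (param1 : List Int) : List Int :=
  let i := VM_P_loop1 8 (param1.length : Int) 1
  VM_P_loop2 (i - 0).toNat param1 0 i

-- ===== PORT B =====
def VM_P_alt (param1 : List Int) : List Int :=
  let pad : Int := 8 - PySem.Int.mod (param1.length : Int) 8
  param1 ++ List.replicate pad.toNat pad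

-- ===== PRECONDITION & SPEC =====
def Spec_VM_P (param1 : List Int) (out : List Int) : Prop := out = VM_P_alt param1
instance (param1 : List Int) (out : List Int) : Decidable (Spec_VM_P param1 out) := by unfold Spec_VM_P; infer_instance

-- ===== CLAIM (what is proved, stated in full; the proofs are below) =====
def Claim_equal_VM_P : Prop := ∀ (param1 : List Int), Dom_VM_P param1 → Spec_VM_P param1 (VM_P param1)

-- ===== LEMMAS AND PROOFS =====
theorem VM_P_loop1_eq (fuel : Nat) (n i : Int) (h : 0 ≤ n + i)
    (hf : ((8 - (n + i) % 8) % 8).toNat < fuel) :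
    VM_P_loop1 fuel n i = i + (8 - (n + i) % 8) % 8 := by
  induction fuel generalizing i with
  | zero => omega
  | succ fuel ih =>
    rw [VM_P_loop1]
    split
    · rename_i hm
      rw [PySem.Int.mod_eq_emod_of_pos (by norm_num)] at hm
      rw [ih (i + 1) (by omega) (by omega)]
      omega
    · rename_i hm
      rw [PySem.Int.mod_eq_emod_of_pos (by norm_num), not_not] at hm
      omega

theorem VM_P_loop2_eq (fuel : Nat) (acc : List Int) (j i : Int)
    (hf : (i - j).toNat ≤ fuel) :
    VM_P_loop2 fuel acc j i = acc ++ List.replicate (i - j).toNat i := by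
  induction fuel generalizing acc j with
  | zero =>
    have : (i - j).toNat = 0 := by omega
    rw [VM_P_loop2, this]
    simp
  | succ fuel ih =>
    rw [VM_P_loop2]
    split
    · rename_i hlt
      rw [ih (acc ++ [i]) (j + 1) (by omega)]
      have hk : (i - j).toNat = (i - (j + 1)).toNat + 1 := by omega
      rw [hk, List.replicate_succ, List.append_assoc]
      rfl
    · rename_i hlt
      have : (i - j).toNat = 0 := by omega
      simp [this]

-- ===== VERDICT (by name: the statement is the Claim_ definition above) =====
theorem VM_P_spec : Claim_equal_VM_P := by
  intro param1 _
  show VM_P param1 = VM_P_alt param1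
  unfold VM_P VM_P_alt
  have hn0 : (0 : Int) ≤ (param1.length : Int) + 1 := by positivity
  rw [VM_P_loop1_eq 8 _ 1 hn0 (by omega), VM_P_loop2_eq _ _ _ _ (by omega),
      PySem.Int.mod_eq_emod_of_pos (by norm_num)]
  have hn : (0 : Int) ≤ (param1.length : Int) := Int.natCast_nonneg _
  have a1 : ((param1.length : Int) + 1) % 8 = ((param1.length : Int) % 8 + 1) % 8 := by omega
  have hb : 0 ≤ (param1.length : Int) % 8 ∧ (param1.length : Int) % 8 < 8 := by omega
  have h1 : (1 : Int) + (8 - ((param1.length : Int) + 1) % 8) % 8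
      = 8 - (param1.length : Int) % 8 := by
    rw [a1]
    obtain ⟨hb1, hb2⟩ := hb
    set k := (param1.length : Int) % 8 with hk
    interval_cases k <;> norm_num
  rw [h1]
  norm_num
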